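-- pv_equiv track=rewrite | github.com/usc-isi-i2/wikidata-wikifier | wikifier/utils.py | color_after_q_nodes
-- ===== SOURCE A (Python) =====
-- def color_after_q_nodes(column_names):
--     color_column_list = []
--     afterwards_columns = []
--     previous_is_wikidata = False
--     for each in column_names:
--         if previous_is_wikidata and "_wikidata" not in each:
--             afterwards_columns.append(each)
--
--         if "_wikidata" in each:
--             previous_is_wikidata = True
--             color_column_list.append(each)
--     return color_column_list, afterwards_columns
-- ===== SOURCE B (Python) =====
-- def color_after_q_nodes(column_names):
--     color_column_list = [c for c in column_names if "_wikidata" in c]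
--     first = next((i for i, c in enumerate(column_names) if "_wikidata" in c), None)
--     if first is None:
--         afterwards_columns = []
--     else:
--         afterwards_columns = [c for c in column_names[first + 1:] if "_wikidata" not in c]
--     return color_column_list, afterwards_columns
-- ===== Notes on version B (the rewrite author's own statement) =====
-- stated objective: simpler
-- what changed: Replaces the flag-threaded single loop with two filters: a direct comprehension for the wikidata columns and, using the index of the first wikidata column, a filtered slice for the columns after it.
import Mathlib
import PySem

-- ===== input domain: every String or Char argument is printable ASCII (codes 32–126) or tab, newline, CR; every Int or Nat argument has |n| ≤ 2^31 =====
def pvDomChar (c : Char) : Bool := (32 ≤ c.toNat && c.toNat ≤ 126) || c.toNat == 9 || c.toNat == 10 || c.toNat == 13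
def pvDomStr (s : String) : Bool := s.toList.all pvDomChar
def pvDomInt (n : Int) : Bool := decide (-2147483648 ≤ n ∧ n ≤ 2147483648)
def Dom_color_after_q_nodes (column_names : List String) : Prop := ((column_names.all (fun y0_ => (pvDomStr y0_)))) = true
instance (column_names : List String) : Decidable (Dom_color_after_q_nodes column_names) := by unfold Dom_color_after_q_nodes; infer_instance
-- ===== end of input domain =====

-- B replaces A's flag-threaded single loop with a filter plus an index-based filtered slice (objective: simpler).

-- ===== PORT A =====
-- A's loop, carrying (color_column_list, afterwards_columns, previous_is_wikidata)
def caqLoop (xs : List String) (colors afters : List String) (flag : Bool) :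
    List String × List String :=
  match xs with
  | [] => (colors, afters)
  | x :: rest =>
    let afters' := if flag && !(PySem.Str.isIn "_wikidata" x) then afters ++ [x] else afters
    if PySem.Str.isIn "_wikidata" x then
      caqLoop rest (colors ++ [x]) afters' true
    else
      caqLoop rest colors afters' flag

def color_after_q_nodes (column_names : List String) : List String × List String :=
  caqLoop column_names [] [] false

-- ===== PORT B =====
def color_after_q_nodes_alt (column_names : List String) : List String × List String :=
  let color_column_list := column_names.filter (fun c => PySem.Str.isIn "_wikidata" c)
  let afterwards_columns :=
    match column_names.findIdx? (fun c => PySem.Str.isIn "_wikidata" c) with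
    | none => []
    | some i => (column_names.drop (i + 1)).filter (fun c => !PySem.Str.isIn "_wikidata" c)
  (color_column_list, afterwards_columns)

-- ===== PRECONDITION & SPEC =====
def Spec_color_after_q_nodes (column_names : List String) (out : List String × List String) : Prop := out = color_after_q_nodes_alt column_names
instance (column_names : List String) (out : List String × List String) : Decidable (Spec_color_after_q_nodes column_names out) := by unfold Spec_color_after_q_nodes; infer_instance

-- ===== CLAIM (what is proved, stated in full; the proofs are below) =====
def Claim_equal_color_after_q_nodes : Prop := ∀ (column_names : List String), Dom_color_after_q_nodes column_names → Spec_color_after_q_nodes column_names (color_after_q_nodes column_names)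

-- ===== LEMMAS AND PROOFS =====

theorem caqLoop_true (xs : List String) (colors afters : List String) :
    caqLoop xs colors afters true =
      (colors ++ xs.filter (fun c => PySem.Str.isIn "_wikidata" c),
       afters ++ xs.filter (fun c => !PySem.Str.isIn "_wikidata" c)) := by
  induction xs generalizing colors afters with
  | nil => simp [caqLoop]
  | cons x rest ih =>
    by_cases h : PySem.Str.isIn "_wikidata" x = true <;> simp at h <;>
      simp [caqLoop, h, ih, List.filter_cons]

theorem caqLoop_false (xs : List String) (colors afters : List String) :
    caqLoop xs colors afters false =
      (colors ++ xs.filter (fun c => PySem.Str.isIn "_wikidata" c),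
       afters ++
         (match xs.findIdx? (fun c => PySem.Str.isIn "_wikidata" c) with
          | none => []
          | some i => (xs.drop (i + 1)).filter (fun c => !PySem.Str.isIn "_wikidata" c))) := by
  induction xs generalizing colors afters with
  | nil => simp [caqLoop]
  | cons x rest ih =>
    by_cases h : PySem.Str.isIn "_wikidata" x = true
    · simp at h
      simp [caqLoop, h, caqLoop_true, List.filter_cons, List.findIdx?_cons]
    · simp at h
      simp only [caqLoop, h, Bool.not_false, Bool.and_true, ih, List.filter_cons,
        List.findIdx?_cons]
      cases hf : rest.findIdx? (fun c => PySem.Str.isIn "_wikidata" c) with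
      | none => simp [h]
      | some i => simp [h]

-- ===== VERDICT (by name: the statement is the Claim_ definition above) =====
theorem color_after_q_nodes_spec : Claim_equal_color_after_q_nodes := by
  intro column_names _
  show _ = _
  simp only [color_after_q_nodes, caqLoop_false, color_after_q_nodes_alt, List.nil_append]
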